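-- pv_equiv track=rewrite | github.com/mulatta/Bioinforamtics-Algorithm-practice | Chapter 1/MostFrequentPseudoPattern.py | makePattern
-- ===== SOURCE A (Python) =====
-- def makePattern(curPatterns, k):
--     # 결과를 반환할 리스트 초기화
--     result = []
--
--     # 추가할 염기의 순서를 지정하는 리스트 초기화
--     baseOrder = ['A', 'T', 'G', 'C']
--
--     if k == 1: return curPatterns
--
--     elif k > 1:
--
--         # 현재 시점의 curPatterns에서 하나를 꺼내 각각 A, T, G, C를 붙인 뒤 result에 저장
--         for subPattern in curPatterns:
--             for i in range(len(baseOrder)):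
--                 result.append(subPattern+baseOrder[i])
--
--         # 한번의 step이 끝나면 감소된 k로 재귀 호출
--         result = makePattern(result, k-1)
--
--         return result
-- ===== SOURCE B (Python) =====
-- def makePattern(curPatterns, k):
--     if k == 1:
--         return curPatterns
--     if k > 1:
--         if not curPatterns:
--             return []
--         # build the set of all (k-1)-length suffixes once, rightmost char fastest,
--         # then attach each suffix to each current pattern in one comprehension
--         suffixes = ['']
--         for _ in range(k - 1):
--             suffixes = [s + c for s in suffixes for c in 'ATGC']
--         return [p + s for p in curPatterns for s in suffixes]
-- ===== Notes on version B (the rewrite author's own statement) =====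
-- stated objective: alternative
-- what changed: Replaces the k-1 recursive append-one-base passes over the growing pattern list by a single pass that first builds the 4^(k-1) suffix table iteratively and then attaches it to curPatterns in one comprehension.
-- outside the precondition, e.g. on makePattern(['A'], 0): A returns None, B returns None
import Mathlib
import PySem

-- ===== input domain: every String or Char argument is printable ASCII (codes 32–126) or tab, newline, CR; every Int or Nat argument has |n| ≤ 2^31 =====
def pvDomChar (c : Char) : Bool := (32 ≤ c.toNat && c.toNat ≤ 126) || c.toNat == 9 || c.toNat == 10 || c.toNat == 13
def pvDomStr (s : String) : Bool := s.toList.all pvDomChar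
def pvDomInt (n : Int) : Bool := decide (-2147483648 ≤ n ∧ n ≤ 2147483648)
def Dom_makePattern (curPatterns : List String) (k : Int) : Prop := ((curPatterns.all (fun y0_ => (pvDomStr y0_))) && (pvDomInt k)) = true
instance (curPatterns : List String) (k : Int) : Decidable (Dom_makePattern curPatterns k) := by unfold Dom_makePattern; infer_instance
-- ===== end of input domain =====

-- B builds the 4^(k-1) suffix table once and attaches it in a single comprehension
-- instead of A's k-1 recursive append-one-base passes (objective: alternative).

-- ===== PORT A =====
-- one recursion step of A: for each subPattern append each of A,T,G,C
def makePatternStep (curPatterns : List String) : List String :=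
  curPatterns.foldl (fun result subPattern =>
    (PySem.List.pyRange 0 4 1).foldl (fun r i =>
      r ++ [subPattern ++ PySem.List.pyGetD ["A", "T", "G", "C"] i ""]) result) []

def makePattern (curPatterns : List String) (k : Int) : List String :=
  if k = 1 then curPatterns
  else if k > 1 then makePattern (makePatternStep curPatterns) (k - 1)
  else []  -- Python A returns None here (no list value); excluded by Pre_
termination_by (k - 1).toNat
decreasing_by omega

-- ===== PORT B =====
-- suffixes = ['']; for _ in range(k-1): suffixes = [s + c for s in suffixes for c in 'ATGC']
def makePatternSuffixes (n : Nat) : List String :=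
  (List.range n).foldl
    (fun suffixes _ => suffixes.flatMap (fun s => "ATGC".toList.map (fun c => s.push c))) [""]

def makePattern_alt (curPatterns : List String) (k : Int) : List String :=
  if k = 1 then curPatterns
  else if k > 1 then
    if curPatterns.isEmpty then []
    else
      let suffixes := makePatternSuffixes (k - 1).toNat
      curPatterns.flatMap (fun p => suffixes.map (fun s => p ++ s))
  else []  -- Source B returns None here; excluded by Pre_

-- ===== PRECONDITION & SPEC =====
-- Pre_ excludes k ≤ 0, where Python A falls through and returns None, which is not a list of strings.
def Pre_makePattern (curPatterns : List String) (k : Int) : Prop := 1 ≤ k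
instance (curPatterns : List String) (k : Int) : Decidable (Pre_makePattern curPatterns k) := by unfold Pre_makePattern; infer_instance
def pvWitness_makePattern : List String × Int := (["A"], 2)

def Spec_makePattern (curPatterns : List String) (k : Int) (out : List String) : Prop := out = makePattern_alt curPatterns k
instance (curPatterns : List String) (k : Int) (out : List String) : Decidable (Spec_makePattern curPatterns k out) := by unfold Spec_makePattern; infer_instance

-- ===== CLAIM (what is proved, stated in full; the proofs are below) =====
def Claim_equal_makePattern : Prop := ∀ (curPatterns : List String) (k : Int), Dom_makePattern curPatterns k → Pre_makePattern curPatterns k → Spec_makePattern curPatterns k (makePattern curPatterns k)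

-- ===== LEMMAS AND PROOFS =====

lemma step_eq (P : List String) :
    makePatternStep P = P.flatMap (fun p => ["A", "T", "G", "C"].map (fun b => p ++ b)) := by
  unfold makePatternStep
  have h4 : PySem.List.pyRange 0 4 1 = [0, 1, 2, 3] := by decide
  have hin : ∀ (r : List String) (s : String),
      [(0:Int), 1, 2, 3].foldl (fun r i => r ++ [s ++ PySem.List.pyGetD ["A", "T", "G", "C"] i ""]) r
        = r ++ (["A", "T", "G", "C"].map (fun b => s ++ b)) := by
    intro r s
    simp [List.foldl, PySem.List.pyGetD]
  rw [h4]
  rw [show (fun (result : List String) subPattern =>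
        [(0:Int), 1, 2, 3].foldl (fun r i => r ++ [subPattern ++ PySem.List.pyGetD ["A", "T", "G", "C"] i ""]) result)
      = (fun (result : List String) subPattern => result ++ (["A", "T", "G", "C"].map (fun b => subPattern ++ b)))
    from funext fun r => funext fun s => hin r s]
  rw [PySem.List.foldl_append_eq_flatMap]
  simp

lemma suffixes_succ (n : Nat) :
    makePatternSuffixes (n + 1)
      = (makePatternSuffixes n).flatMap (fun s => ["A", "T", "G", "C"].map (fun b => s ++ b)) := by
  unfold makePatternSuffixes
  rw [List.range_succ, List.foldl_append]
  simp only [List.foldl_cons, List.foldl_nil]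
  congr 1

lemma suffixes_zero : makePatternSuffixes 0 = [""] := rfl

-- head decomposition: the first suffix character varies slowest
lemma suffixes_head (n : Nat) :
    makePatternSuffixes (n + 1)
      = ["A", "T", "G", "C"].flatMap (fun b => (makePatternSuffixes n).map (fun s => b ++ s)) := by
  induction n with
  | zero => decide
  | succ m ih =>
    conv_lhs => rw [suffixes_succ, ih]
    conv_rhs => rw [suffixes_succ]
    simp [List.flatMap_assoc, List.flatMap_map, List.map_flatMap, List.map_map, String.append_assoc]

-- B as a flatMap formula, for every k = n+1 ≥ 1
lemma alt_eq (n : Nat) (P : List String) :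
    makePattern_alt P ((n : Int) + 1)
      = P.flatMap (fun p => (makePatternSuffixes n).map (fun s => p ++ s)) := by
  cases n with
  | zero =>
    simp [makePattern_alt, suffixes_zero]
  | succ m =>
    unfold makePattern_alt
    push_cast
    rw [if_neg (by omega), if_pos (by omega)]
    cases P with
    | nil => simp
    | cons p ps => norm_num

lemma main_eq (n : Nat) (P : List String) :
    makePattern P ((n : Int) + 1) = makePattern_alt P ((n : Int) + 1) := by
  induction n generalizing P with
  | zero => simp [makePattern, makePattern_alt]
  | succ m ih =>
    have hc : ((m + 1 : Nat) : Int) + 1 = (m : Int) + 1 + 1 := by push_cast; ring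
    rw [alt_eq, hc]
    have hA : makePattern P ((m : Int) + 1 + 1) = makePattern (makePatternStep P) ((m : Int) + 1) := by
      rw [makePattern]
      rw [if_neg (by omega), if_pos (by omega)]
      norm_num
    rw [hA, ih, alt_eq, step_eq, suffixes_head]
    simp [List.flatMap_assoc, List.map_map, Function.comp_def, String.append_assoc]

-- ===== VERDICT (by name: the statement is the Claim_ definition above) =====
theorem makePattern_spec : Claim_equal_makePattern := by
  intro P k _ hpre
  unfold Spec_makePattern
  have hk : k = ((k - 1).toNat : Int) + 1 := by
    have : (0:Int) ≤ k - 1 := by exact Int.sub_nonneg.mpr hpre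
    omega
  rw [hk]
  exact main_eq (k - 1).toNat P
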